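-- pv_equiv track=rewrite | github.com/hapticasensorics/1context | memory-core/src/onectx/wiki/cli.py | known_work_comparison
-- ===== SOURCE A (Python) =====
-- def known_work_comparison(words: int) -> str:
--     if words <= 0:
--         return "readable wiki"
--     comparisons = [
--         (1000, "short note"),
--         (3000, "feature article"),
--         (7500, "long essay"),
--         (30000, "Of Mice and Men-sized"),
--         (47000, "Gatsby-sized"),
--         (59000, "Fahrenheit 451-sized"),
--         (89000, "typical novel-sized"),
--         (181000, "Moby-Dick-sized"),
--         (587000, "War and Peace-sized"),
--     ]
--     for limit, label in comparisons:
--         if words <= limit: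
--             return label
--     return "library-sized"
-- ===== SOURCE B (Python) =====
-- LIMITS = [1000, 3000, 7500, 30000, 47000, 59000, 89000, 181000, 587000]
-- LABELS = [
--     "short note",
--     "feature article",
--     "long essay",
--     "Of Mice and Men-sized",
--     "Gatsby-sized",
--     "Fahrenheit 451-sized",
--     "typical novel-sized",
--     "Moby-Dick-sized",
--     "War and Peace-sized",
-- ]
--
-- def _bisect_left(xs, x):
--     lo, hi = 0, len(xs)
--     while lo < hi:
--         mid = (lo + hi) // 2
--         if xs[mid] < x:
--             lo = mid + 1
--         else:
--             hi = mid
--     return lo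
--
-- def known_work_comparison(words: int) -> str:
--     if words <= 0:
--         return "readable wiki"
--     i = _bisect_left(LIMITS, words)
--     return LABELS[i] if i < len(LABELS) else "library-sized"
-- ===== Notes on version B (the rewrite author's own statement) =====
-- stated objective: alternative
-- what changed: Replaces the sequential scan over the (limit, label) table with a binary search (bisect_left) over the sorted limits list plus a parallel labels list.
import Mathlib
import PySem

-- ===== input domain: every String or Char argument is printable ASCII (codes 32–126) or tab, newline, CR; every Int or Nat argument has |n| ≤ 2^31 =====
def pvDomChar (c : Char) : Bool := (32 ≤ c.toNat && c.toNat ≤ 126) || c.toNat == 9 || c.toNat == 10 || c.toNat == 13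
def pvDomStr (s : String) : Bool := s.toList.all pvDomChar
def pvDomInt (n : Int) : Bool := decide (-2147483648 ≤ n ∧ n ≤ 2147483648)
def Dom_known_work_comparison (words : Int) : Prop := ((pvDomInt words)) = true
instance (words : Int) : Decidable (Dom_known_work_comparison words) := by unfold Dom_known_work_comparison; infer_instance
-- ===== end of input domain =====

-- B replaces A's sequential scan of the (limit, label) table with a bisect_left
-- binary search over the sorted limits plus a parallel labels list (alternative, same result).

-- ===== PORT A =====
def kwcComparisons : List (Int × String) :=
  [ (1000, "short note"),
    (3000, "feature article"),
    (7500, "long essay"),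
    (30000, "Of Mice and Men-sized"),
    (47000, "Gatsby-sized"),
    (59000, "Fahrenheit 451-sized"),
    (89000, "typical novel-sized"),
    (181000, "Moby-Dick-sized"),
    (587000, "War and Peace-sized") ]

-- the 'for limit, label in comparisons' loop with its early returns
def kwcLoop (words : Int) : List (Int × String) → String
  | [] => "library-sized"
  | (limit, label) :: rest => if words ≤ limit then label else kwcLoop words rest

def known_work_comparison (words : Int) : String :=
  if words ≤ 0 then "readable wiki"
  else kwcLoop words kwcComparisons

-- ===== PORT B =====
def kwcLimits : List Int := [1000, 3000, 7500, 30000, 47000, 59000, 89000, 181000, 587000]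
def kwcLabels : List String :=
  [ "short note", "feature article", "long essay", "Of Mice and Men-sized",
    "Gatsby-sized", "Fahrenheit 451-sized", "typical novel-sized",
    "Moby-Dick-sized", "War and Peace-sized" ]

-- the 'while lo < hi' loop of _bisect_left, bounded by fuel gas = xs.length
-- (hi - lo starts at xs.length and strictly shrinks each iteration, so the fuel never runs out;
--  xs[mid] is in range whenever lo < hi ≤ |xs|, so getD is exact)
def kwcBisectLoop (xs : List Int) (x : Int) (lo hi : Nat) : Nat → Nat
  | 0 => lo
  | gas + 1 =>
    if lo < hi then
      let mid := (lo + hi) / 2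
      if xs.getD mid 0 < x then kwcBisectLoop xs x (mid + 1) hi gas
      else kwcBisectLoop xs x lo mid gas
    else lo

def kwcBisectLeft (xs : List Int) (x : Int) : Nat := kwcBisectLoop xs x 0 xs.length xs.length

def known_work_comparison_alt (words : Int) : String :=
  if words ≤ 0 then "readable wiki"
  else
    let i := kwcBisectLeft kwcLimits words
    if i < kwcLabels.length then kwcLabels.getD i "" else "library-sized"

-- ===== PRECONDITION & SPEC =====
def Spec_known_work_comparison (words : Int) (out : String) : Prop := out = known_work_comparison_alt words
instance (words : Int) (out : String) : Decidable (Spec_known_work_comparison words out) := by unfold Spec_known_work_comparison; infer_instance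

-- ===== CLAIM (what is proved, stated in full; the proofs are below) =====
def Claim_equal_known_work_comparison : Prop := ∀ (words : Int), Dom_known_work_comparison words → Spec_known_work_comparison words (known_work_comparison words)

-- ===== LEMMAS AND PROOFS =====

-- one unfolding step of the binary-search loop, stated so that `rw` applies to a numeral fuel
theorem kwcBisectLoop_step (xs : List Int) (x : Int) (lo hi gas : Nat) (h : 0 < gas) :
    kwcBisectLoop xs x lo hi gas =
      if lo < hi then
        (if xs.getD ((lo + hi) / 2) 0 < x then kwcBisectLoop xs x ((lo + hi) / 2 + 1) hi (gas - 1)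
         else kwcBisectLoop xs x lo ((lo + hi) / 2) (gas - 1))
      else lo := by
  obtain ⟨g, rfl⟩ : ∃ g, gas = g + 1 := ⟨gas - 1, by omega⟩
  by_cases hlh : lo < hi <;> simp [kwcBisectLoop, hlh]

-- ===== VERDICT (by name: the statement is the Claim_ definition above) =====
theorem known_work_comparison_spec : Claim_equal_known_work_comparison := by
  intro words _
  unfold Spec_known_work_comparison known_work_comparison known_work_comparison_alt
  by_cases h0 : words ≤ 0
  · simp [h0]
  · simp only [h0, if_false, kwcBisectLeft, kwcLimits, List.length]
    norm_num
    by_cases h1 : words ≤ 1000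
    · -- interval 0
      rw [kwcBisectLoop_step _ words 0 9 9 (by norm_num)]
      norm_num [List.getD, kwcLimits]
      rw [if_neg (by omega : ¬(47000:ℤ) < words)]
      rw [kwcBisectLoop_step _ words 0 4 8 (by norm_num)]
      norm_num [List.getD, kwcLimits]
      rw [if_neg (by omega : ¬(7500:ℤ) < words)]
      rw [kwcBisectLoop_step _ words 0 2 7 (by norm_num)]
      norm_num [List.getD, kwcLimits]
      rw [if_neg (by omega : ¬(3000:ℤ) < words)]
      rw [kwcBisectLoop_step _ words 0 1 6 (by norm_num)]
      norm_num [List.getD, kwcLimits]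
      rw [if_neg (by omega : ¬(1000:ℤ) < words)]
      simp [kwcBisectLoop, kwcComparisons, kwcLoop, kwcLabels, h1]
    · -- words > 1000
      by_cases h2 : words ≤ 3000
      · -- interval 1
        rw [kwcBisectLoop_step _ words 0 9 9 (by norm_num)]
        norm_num [List.getD, kwcLimits]
        rw [if_neg (by omega : ¬(47000:ℤ) < words)]
        rw [kwcBisectLoop_step _ words 0 4 8 (by norm_num)]
        norm_num [List.getD, kwcLimits]
        rw [if_neg (by omega : ¬(7500:ℤ) < words)]
        rw [kwcBisectLoop_step _ words 0 2 7 (by norm_num)]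
        norm_num [List.getD, kwcLimits]
        rw [if_neg (by omega : ¬(3000:ℤ) < words)]
        rw [kwcBisectLoop_step _ words 0 1 6 (by norm_num)]
        norm_num [List.getD, kwcLimits]
        rw [if_pos (by omega : (1000:ℤ) < words)]
        simp [kwcBisectLoop, kwcComparisons, kwcLoop, kwcLabels, h1, h2]
      · -- words > 3000
        by_cases h3 : words ≤ 7500
        · -- interval 2
          rw [kwcBisectLoop_step _ words 0 9 9 (by norm_num)]
          norm_num [List.getD, kwcLimits]
          rw [if_neg (by omega : ¬(47000:ℤ) < words)]
          rw [kwcBisectLoop_step _ words 0 4 8 (by norm_num)]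
          norm_num [List.getD, kwcLimits]
          rw [if_neg (by omega : ¬(7500:ℤ) < words)]
          rw [kwcBisectLoop_step _ words 0 2 7 (by norm_num)]
          norm_num [List.getD, kwcLimits]
          rw [if_pos (by omega : (3000:ℤ) < words)]
          simp [kwcBisectLoop, kwcComparisons, kwcLoop, kwcLabels, h1, h2, h3]
        · -- words > 7500
          by_cases h4 : words ≤ 30000
          · -- interval 3
            rw [kwcBisectLoop_step _ words 0 9 9 (by norm_num)]
            norm_num [List.getD, kwcLimits]
            rw [if_neg (by omega : ¬(47000:ℤ) < words)]
            rw [kwcBisectLoop_step _ words 0 4 8 (by norm_num)]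
            norm_num [List.getD, kwcLimits]
            rw [if_pos (by omega : (7500:ℤ) < words)]
            rw [kwcBisectLoop_step _ words 3 4 7 (by norm_num)]
            norm_num [List.getD, kwcLimits]
            rw [if_neg (by omega : ¬(30000:ℤ) < words)]
            simp [kwcBisectLoop, kwcComparisons, kwcLoop, kwcLabels, h1, h2, h3, h4]
          · -- words > 30000
            by_cases h5 : words ≤ 47000
            · -- interval 4
              rw [kwcBisectLoop_step _ words 0 9 9 (by norm_num)]
              norm_num [List.getD, kwcLimits]
              rw [if_neg (by omega : ¬(47000:ℤ) < words)]
              rw [kwcBisectLoop_step _ words 0 4 8 (by norm_num)]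
              norm_num [List.getD, kwcLimits]
              rw [if_pos (by omega : (7500:ℤ) < words)]
              rw [kwcBisectLoop_step _ words 3 4 7 (by norm_num)]
              norm_num [List.getD, kwcLimits]
              rw [if_pos (by omega : (30000:ℤ) < words)]
              simp [kwcBisectLoop, kwcComparisons, kwcLoop, kwcLabels, h1, h2, h3, h4, h5]
            · -- words > 47000
              by_cases h6 : words ≤ 59000
              · -- interval 5
                rw [kwcBisectLoop_step _ words 0 9 9 (by norm_num)]
                norm_num [List.getD, kwcLimits]
                rw [if_pos (by omega : (47000:ℤ) < words)]
                rw [kwcBisectLoop_step _ words 5 9 8 (by norm_num)]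
                norm_num [List.getD, kwcLimits]
                rw [if_neg (by omega : ¬(181000:ℤ) < words)]
                rw [kwcBisectLoop_step _ words 5 7 7 (by norm_num)]
                norm_num [List.getD, kwcLimits]
                rw [if_neg (by omega : ¬(89000:ℤ) < words)]
                rw [kwcBisectLoop_step _ words 5 6 6 (by norm_num)]
                norm_num [List.getD, kwcLimits]
                rw [if_neg (by omega : ¬(59000:ℤ) < words)]
                simp [kwcBisectLoop, kwcComparisons, kwcLoop, kwcLabels, h1, h2, h3, h4, h5, h6]
              · -- words > 59000
                by_cases h7 : words ≤ 89000
                · -- interval 6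
                  rw [kwcBisectLoop_step _ words 0 9 9 (by norm_num)]
                  norm_num [List.getD, kwcLimits]
                  rw [if_pos (by omega : (47000:ℤ) < words)]
                  rw [kwcBisectLoop_step _ words 5 9 8 (by norm_num)]
                  norm_num [List.getD, kwcLimits]
                  rw [if_neg (by omega : ¬(181000:ℤ) < words)]
                  rw [kwcBisectLoop_step _ words 5 7 7 (by norm_num)]
                  norm_num [List.getD, kwcLimits]
                  rw [if_neg (by omega : ¬(89000:ℤ) < words)]
                  rw [kwcBisectLoop_step _ words 5 6 6 (by norm_num)]
                  norm_num [List.getD, kwcLimits]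
                  rw [if_pos (by omega : (59000:ℤ) < words)]
                  simp [kwcBisectLoop, kwcComparisons, kwcLoop, kwcLabels, h1, h2, h3, h4, h5, h6, h7]
                · -- words > 89000
                  by_cases h8 : words ≤ 181000
                  · -- interval 7
                    rw [kwcBisectLoop_step _ words 0 9 9 (by norm_num)]
                    norm_num [List.getD, kwcLimits]
                    rw [if_pos (by omega : (47000:ℤ) < words)]
                    rw [kwcBisectLoop_step _ words 5 9 8 (by norm_num)]
                    norm_num [List.getD, kwcLimits]
                    rw [if_neg (by omega : ¬(181000:ℤ) < words)]
                    rw [kwcBisectLoop_step _ words 5 7 7 (by norm_num)]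
                    norm_num [List.getD, kwcLimits]
                    rw [if_pos (by omega : (89000:ℤ) < words)]
                    simp [kwcBisectLoop, kwcComparisons, kwcLoop, kwcLabels, h1, h2, h3, h4, h5, h6, h7, h8]
                  · -- words > 181000
                    by_cases h9 : words ≤ 587000
                    · -- interval 8
                      rw [kwcBisectLoop_step _ words 0 9 9 (by norm_num)]
                      norm_num [List.getD, kwcLimits]
                      rw [if_pos (by omega : (47000:ℤ) < words)]
                      rw [kwcBisectLoop_step _ words 5 9 8 (by norm_num)]
                      norm_num [List.getD, kwcLimits]
                      rw [if_pos (by omega : (181000:ℤ) < words)]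
                      rw [kwcBisectLoop_step _ words 8 9 7 (by norm_num)]
                      norm_num [List.getD, kwcLimits]
                      rw [if_neg (by omega : ¬(587000:ℤ) < words)]
                      simp [kwcBisectLoop, kwcComparisons, kwcLoop, kwcLabels, h1, h2, h3, h4, h5, h6, h7, h8, h9]
                    · -- words > 587000
                      rw [kwcBisectLoop_step _ words 0 9 9 (by norm_num)]
                      norm_num [List.getD, kwcLimits]
                      rw [if_pos (by omega : (47000:ℤ) < words)]
                      rw [kwcBisectLoop_step _ words 5 9 8 (by norm_num)]
                      norm_num [List.getD, kwcLimits]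
                      rw [if_pos (by omega : (181000:ℤ) < words)]
                      rw [kwcBisectLoop_step _ words 8 9 7 (by norm_num)]
                      norm_num [List.getD, kwcLimits]
                      rw [if_pos (by omega : (587000:ℤ) < words)]
                      simp [kwcBisectLoop, kwcComparisons, kwcLoop, kwcLabels, h1, h2, h3, h4, h5, h6, h7, h8, h9]
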